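-- pv_equiv track=rewrite | github.com/ScienceStacks/SciSheets | mysite/scisheets/ui/ui_table.py | _addEscapesToQuotes
-- ===== SOURCE A (Python) =====
-- def _addEscapesToQuotes(iter_str):
--   # Puts in the \ escape character for quotes, ' & "
--   # Input: iterable of strings
--   # Output: list with inserted escapes
--   result = []
--   for item in iter_str:
--     if isinstance(item, str):
--       new_item = item.replace('"', '\\\\"')
--       newer_item = new_item.replace("'", "\\\\'")
--       result.append(newer_item)
--     else:
--       result.append(item)
--   return result
-- ===== SOURCE B (Python) =====
-- _ESC = {'"': '\\\\"', "'": "\\\\'"}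
--
-- def _addEscapesToQuotes(iter_str):
--   # Single character pass per string: expand each quote char via a lookup table.
--   return [''.join([_ESC.get(c, c) for c in item]) if isinstance(item, str) else item
--           for item in iter_str]
-- ===== Notes on version B (the rewrite author's own statement) =====
-- stated objective: idiomatic
-- what changed: Replaces the two sequential full-string .replace scans per item with one character-level pass using a lookup table and ''.join, built as a list comprehension instead of an accumulator loop.
import Mathlib
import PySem

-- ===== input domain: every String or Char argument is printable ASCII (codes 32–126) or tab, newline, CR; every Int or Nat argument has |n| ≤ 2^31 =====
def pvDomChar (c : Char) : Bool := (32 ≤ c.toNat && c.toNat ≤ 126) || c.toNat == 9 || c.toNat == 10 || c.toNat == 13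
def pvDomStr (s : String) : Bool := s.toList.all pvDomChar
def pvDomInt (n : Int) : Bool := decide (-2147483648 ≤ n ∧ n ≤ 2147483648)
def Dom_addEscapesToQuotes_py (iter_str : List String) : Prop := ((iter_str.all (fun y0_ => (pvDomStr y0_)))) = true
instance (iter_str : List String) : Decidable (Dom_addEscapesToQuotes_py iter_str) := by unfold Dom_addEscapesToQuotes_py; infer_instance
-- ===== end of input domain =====

-- B escapes quotes in one character pass per string (lookup table + join) instead of
-- A's two sequential full-string replace scans; return values are identical.

-- ===== PORT A =====
-- result = []; for item: result.append(item.replace('"','\\\\"').replace("'","\\\\'"))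
def addEscapesToQuotes_py (iter_str : List String) : List String :=
  iter_str.foldl
    (fun result item =>
      let new_item := PySem.Str.replace item "\"" "\\\\\""
      let newer_item := PySem.Str.replace new_item "'" "\\\\'"
      result ++ [newer_item])
    []

-- ===== PORT B =====
-- _ESC.get(c, c): table lookup, default the character itself
def escGet (c : Char) : List Char :=
  (PySem.Dict.getD (PySem.Dict.ofList [('\"', "\\\\\""), ('\'', "\\\\'")]) c (String.ofList [c])).toList

-- ''.join([_ESC.get(c, c) for c in item]) for each item
def addEscapesToQuotes_py_alt (iter_str : List String) : List String :=
  iter_str.map (fun item => String.ofList ((item.toList.map escGet).flatten))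

-- ===== PRECONDITION & SPEC =====
def Spec_addEscapesToQuotes_py (iter_str : List String) (out : List String) : Prop := out = addEscapesToQuotes_py_alt iter_str
instance (iter_str : List String) (out : List String) : Decidable (Spec_addEscapesToQuotes_py iter_str out) := by unfold Spec_addEscapesToQuotes_py; infer_instance

-- ===== CLAIM (what is proved, stated in full; the proofs are below) =====
def Claim_equal_addEscapesToQuotes_py : Prop := ∀ (iter_str : List String), Dom_addEscapesToQuotes_py iter_str → Spec_addEscapesToQuotes_py iter_str (addEscapesToQuotes_py iter_str)

-- ===== LEMMAS AND PROOFS =====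

-- replace.go with a single-char pattern is a per-character expansion
lemma go_single (q : Char) (new : List Char) :
    ∀ (l acc : List Char),
      PySem.Chars.replace.go [q] new l.length l acc
        = acc.reverse ++ l.flatMap (fun c => if c = q then new else [c]) := by
  intro l
  induction l with
  | nil => intro acc; simp [PySem.Chars.replace.go]
  | cons c t ih =>
    intro acc
    rw [List.length_cons, PySem.Chars.replace.go]
    by_cases h : c = q
    · subst h
      simp [List.isPrefixOf, ih]
    · have hp : List.isPrefixOf [q] (c :: t) = false := by
        simp [List.isPrefixOf]
        exact fun hq => h hq.symm
      simp [hp, ih, h]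

lemma replace_single (q : Char) (new : List Char) (s : List Char) :
    PySem.Chars.replace s [q] new = s.flatMap (fun c => if c = q then new else [c]) := by
  rw [PySem.Chars.replace]
  simp [go_single]

-- escGet computed on each character
lemma escGet_eq (c : Char) :
    escGet c = if c = '\"' then ['\\', '\\', '\"']
               else if c = '\'' then ['\\', '\\', '\''] else [c] := by
  by_cases h1 : c = '\"'
  · subst h1; decide
  · by_cases h2 : c = '\''
    · subst h2; decide
    · have b1 : ('\"' == c) = false := by simp [Ne.symm h1]
      have b2 : ('\'' == c) = false := by simp [Ne.symm h2]
      simp [escGet, PySem.Dict.getD, PySem.Dict.get?, PySem.Dict.ofList,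
        PySem.Dict.update, PySem.Dict.insert, PySem.Dict.empty,
        PySem.Dict.contains, List.find?, b1, b2, h1, h2]

-- both escapings agree on one string
lemma per_string (item : String) :
    PySem.Str.replace (PySem.Str.replace item "\"" "\\\\\"") "'" "\\\\'"
      = String.ofList ((item.toList.map escGet).flatten) := by
  have h1 : ("\"" : String).toList = ['\"'] := by decide
  have h2 : ("'" : String).toList = ['\''] := by decide
  apply String.toList_injective
  simp only [PySem.Str.toList_replace, h1, h2, replace_single, List.flatMap_assoc,
    String.toList_ofList]
  rw [← List.flatMap_def]
  induction item.toList with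
  | nil => rfl
  | cons c t ih =>
    simp only [List.flatMap_cons, ih, escGet_eq]
    by_cases hq : c = '\"'
    · subst hq; rfl
    · by_cases hs : c = '\''
      · subst hs; simp
      · simp [hq, hs]

-- ===== VERDICT (by name: the statement is the Claim_ definition above) =====
theorem addEscapesToQuotes_py_spec : Claim_equal_addEscapesToQuotes_py := by
  intro iter_str _
  unfold Spec_addEscapesToQuotes_py addEscapesToQuotes_py addEscapesToQuotes_py_alt
  simp only [per_string]
  exact (PySem.List.foldl_append_singleton_eq_map _ _ _).trans (by simp)
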